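-- pv_equiv track=rewrite | github.com/SakshamAhlawat/indusnlp-v2 | filters/textcleaner.py | remove_line_and_below
-- ===== SOURCE A (Python) =====
-- def remove_line_and_below(text, keywords):
--     """Remove a line and all lines below it if it contains a keyword."""
--     lines = text.split("\n")
--     for keyword in keywords:
--         to_remove = set()
--         for i, line in enumerate(lines):
--             if keyword in line:
--                 if i < len(lines) - 1:
--                     to_remove.update(range(i, len(lines)))
--                 else:
--                     to_remove.add(i)
--         lines = [line for idx, line in enumerate(lines) if idx not in to_remove]
--     return "\n".join(lines)
-- ===== SOURCE B (Python) =====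
-- def remove_line_and_below(text, keywords):
--     """Remove a line and all lines below it if it contains a keyword."""
--     lines = text.split("\n")
--     for keyword in keywords:
--         for i, line in enumerate(lines):
--             if keyword in line:
--                 lines = lines[:i]
--                 break
--     return "\n".join(lines)
-- ===== Notes on version B (the rewrite author's own statement) =====
-- stated objective: simpler
-- what changed: B replaces A's per-keyword construction of a removal-index set (unioning index ranges) plus a filtering comprehension by a single early-exit scan: truncate the line list at the first line containing the keyword and break.
import Mathlib
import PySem

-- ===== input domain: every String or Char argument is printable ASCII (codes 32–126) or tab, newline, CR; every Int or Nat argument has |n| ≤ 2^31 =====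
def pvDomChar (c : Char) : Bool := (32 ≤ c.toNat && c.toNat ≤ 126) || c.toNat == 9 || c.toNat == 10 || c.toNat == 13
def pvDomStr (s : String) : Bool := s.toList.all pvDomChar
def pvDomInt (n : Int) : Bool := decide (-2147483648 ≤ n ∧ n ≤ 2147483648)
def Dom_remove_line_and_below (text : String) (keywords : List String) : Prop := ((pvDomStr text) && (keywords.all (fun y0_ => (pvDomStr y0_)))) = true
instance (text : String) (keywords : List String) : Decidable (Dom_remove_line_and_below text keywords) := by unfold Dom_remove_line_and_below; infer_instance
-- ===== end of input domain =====

-- B truncates the line list at the first keyword-containing line with an early-exit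
-- scan, instead of A's removal-index set built from range unions plus a filtering
-- comprehension; equal return values, objective: simpler.

-- ===== PORT A =====
-- text.split("\n"): total form of Str.split? — the separator "\n" is non-empty, so
-- split? always returns some and the getD default is unreachable
def pvSplitNl (text : String) : List String := (PySem.Str.split? text "\n").getD []

-- the update applied to to_remove for one enumerated line (the inner if-chain of A)
def pvAddRemove (keyword : String) (n : Nat) (s : PySem.Set Int) (p : Int × String) : PySem.Set Int :=
  if PySem.Str.isIn keyword p.2 then
    if p.1 < (n : Int) - 1 then PySem.Set.update s (PySem.List.pyRange p.1 (n : Int) 1)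
    else PySem.Set.add s p.1
  else s

-- the body of A's outer loop: build to_remove, then the filtering comprehension
def pvStepA (lines : List String) (keyword : String) : List String :=
  let toRemove : PySem.Set Int :=
    (PySem.List.enumerate lines 0).foldl (pvAddRemove keyword lines.length) PySem.Set.empty
  (PySem.List.enumerate lines 0).foldl
    (fun acc p => if PySem.Set.contains toRemove p.1 then acc else acc ++ [p.2]) []

def remove_line_and_below (text : String) (keywords : List String) : String :=
  PySem.Str.join "\n" (keywords.foldl pvStepA (pvSplitNl text))

-- ===== PORT B =====
-- the body of B's outer loop: scan, truncate at the first match (lines[:i]) and break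
def pvTrunc (keyword : String) : List String → List String
  | [] => []
  | l :: ls => if PySem.Str.isIn keyword l then [] else l :: pvTrunc keyword ls

def remove_line_and_below_alt (text : String) (keywords : List String) : String :=
  PySem.Str.join "\n" (keywords.foldl (fun lines keyword => pvTrunc keyword lines) (pvSplitNl text))

-- ===== PRECONDITION & SPEC =====
def Spec_remove_line_and_below (text : String) (keywords : List String) (out : String) : Prop := out = remove_line_and_below_alt text keywords
instance (text : String) (keywords : List String) (out : String) : Decidable (Spec_remove_line_and_below text keywords out) := by unfold Spec_remove_line_and_below; infer_instance

-- ===== CLAIM (what is proved, stated in full; the proofs are below) =====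
def Claim_equal_remove_line_and_below : Prop := ∀ (text : String) (keywords : List String), Dom_remove_line_and_below text keywords → Spec_remove_line_and_below text keywords (remove_line_and_below text keywords)

-- ===== LEMMAS AND PROOFS =====

-- membership in the to_remove set built by A's inner loop
lemma pv_mem_build (kw : String) (n : Nat) : ∀ (xs : List String) (off : Int) (s : PySem.Set Int) (j : Int),
    (j ∈ (PySem.List.enumerate xs off).foldl (pvAddRemove kw n) s) ↔
      j ∈ s ∨ ∃ (k : Nat) (_ : k < xs.length), PySem.Str.isIn kw xs[k] = true ∧
        (if off + (k : Int) < (n : Int) - 1 then off + (k : Int) ≤ j ∧ j < (n : Int) else j = off + (k : Int)) := by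
  intro xs
  induction xs with
  | nil => intro off s j; simp [PySem.List.enumerate_nil]
  | cons x xs ih =>
    intro off s j
    rw [PySem.List.enumerate_cons, List.foldl_cons, ih]
    have hx : ∀ (s' : PySem.Set Int), j ∈ pvAddRemove kw n s' (off, x) ↔
        j ∈ s' ∨ (PySem.Str.isIn kw x = true ∧
          (if off < (n : Int) - 1 then off ≤ j ∧ j < (n : Int) else j = off)) := by
      intro s'
      simp only [pvAddRemove]
      by_cases hin : PySem.Str.isIn kw x = true
      · rw [if_pos hin]
        by_cases hlt : off < (n : Int) - 1
        · rw [if_pos hlt, PySem.Set.mem_update, PySem.List.mem_pyRange_one, if_pos hlt,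
            eq_true hin]
          simp only [true_and]
        · rw [if_neg hlt, if_neg hlt, PySem.Set.mem_add, eq_true hin]
          simp only [true_and]
      · rw [if_neg hin, eq_false hin]
        simp only [false_and, or_false]
    rw [hx]
    constructor
    · rintro (h | ⟨k, hk, hkin, hcond⟩)
      · rcases h with h | h
        · exact Or.inl h
        · exact Or.inr ⟨0, by simp, by simpa using h.1, by simpa using h.2⟩
      · refine Or.inr ⟨k + 1, by simp only [List.length_cons]; omega, by simpa using hkin, ?_⟩
        have hcast : off + ((k + 1 : Nat) : Int) = off + 1 + (k : Int) := by push_cast; ring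
        rw [hcast]; exact hcond
    · rintro (h | ⟨k, hk, hkin, hcond⟩)
      · exact Or.inl (Or.inl h)
      · cases k with
        | zero => exact Or.inl (Or.inr ⟨by simpa using hkin, by simpa using hcond⟩)
        | succ k =>
          refine Or.inr ⟨k, by simp only [List.length_cons] at hk; omega, by simpa using hkin, ?_⟩
          have hcast : off + 1 + (k : Int) = off + ((k + 1 : Nat) : Int) := by push_cast; ring
          rw [hcast]; exact hcond

-- the filtering comprehension over a set holding exactly the indices [k0, n) keeps the first k0 lines
lemma pv_keep_fold (T : PySem.Set Int) (k0 n : Nat)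
    (hc : ∀ j : Int, PySem.Set.contains T j = true ↔ ((k0 : Int) ≤ j ∧ j < (n : Int))) :
    ∀ (xs : List String) (off : Nat), off + xs.length ≤ n → ∀ (acc : List String),
    (PySem.List.enumerate xs (off : Int)).foldl
        (fun acc p => if PySem.Set.contains T p.1 then acc else acc ++ [p.2]) acc
      = acc ++ xs.take (k0 - off) := by
  intro xs
  induction xs with
  | nil => intro off _ acc; simp [PySem.List.enumerate_nil]
  | cons x xs ih =>
    intro off hub acc
    have hoff : ((off : Int) + 1) = ((off + 1 : Nat) : Int) := by push_cast; ring
    rw [PySem.List.enumerate_cons, List.foldl_cons, hoff]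
    by_cases hk : k0 ≤ off
    · have hT : PySem.Set.contains T (off : Int) = true := by
        rw [hc]
        exact ⟨by exact_mod_cast hk, by simp only [List.length_cons] at hub; omega⟩
      rw [if_pos hT, ih (off + 1) (by simp only [List.length_cons] at hub ⊢; omega) acc]
      have h1 : k0 - off = 0 := by omega
      have h2 : k0 - (off + 1) = 0 := by omega
      simp [h1, h2]
    · have hT : ¬ PySem.Set.contains T (off : Int) = true := by
        intro h
        have := (hc (off : Int)).mp h
        omega
      rw [if_neg hT, ih (off + 1) (by simp only [List.length_cons] at hub ⊢; omega) (acc ++ [x])]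
      have h1 : k0 - off = (k0 - (off + 1)) + 1 := by omega
      simp [h1, List.take_succ_cons]

-- pvTrunc is takeWhile (no keyword occurrence)
lemma pv_trunc_eq_takeWhile (kw : String) : ∀ (xs : List String),
    pvTrunc kw xs = xs.takeWhile (fun l => !PySem.Str.isIn kw l) := by
  intro xs
  induction xs with
  | nil => rfl
  | cons x xs ih =>
    simp only [List.takeWhile_cons]
    unfold pvTrunc
    simp only [PySem.Str.isIn_eq] at ih ⊢
    by_cases hin : PySem.Chars.isIn kw.toList x.toList = true
    · rw [if_pos hin, if_neg (by simp [hin])]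
    · have hf : PySem.Chars.isIn kw.toList x.toList = false := by
        revert hin; cases PySem.Chars.isIn kw.toList x.toList <;> simp
      rw [if_neg hin, if_pos (by rw [hf]; rfl), ih]

-- the element right after the takeWhile prefix fails the predicate
lemma pv_takeWhile_boundary {α : Type} (p : α → Bool) : ∀ (xs : List α),
    ∀ x ∈ xs[(xs.takeWhile p).length]?, p x = false := by
  intro xs
  induction xs with
  | nil => intro x hx; simp at hx
  | cons y xs ih =>
    intro x hx
    by_cases hy : p y = true
    · have ht : (y :: xs).takeWhile p = y :: xs.takeWhile p := by simp [hy]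
      rw [ht, List.length_cons, List.getElem?_cons_succ] at hx
      exact ih x hx
    · have ht : (y :: xs).takeWhile p = [] := by simp [hy]
      rw [ht] at hx
      simp only [List.length_nil, List.getElem?_cons_zero, Option.mem_def, Option.some.injEq] at hx
      subst hx
      simpa using hy

-- A's loop body equals B's loop body
lemma pv_step_eq (lines : List String) (kw : String) : pvStepA lines kw = pvTrunc kw lines := by
  set p : String → Bool := fun l => !PySem.Str.isIn kw l with hp
  set k0 : Nat := (lines.takeWhile p).length with hk0
  set n : Nat := lines.length with hn
  have hk0n : k0 ≤ n := by
    rw [hk0, hn]; exact (List.takeWhile_sublist p).length_le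
  -- prefix elements do not contain kw
  have hpre : ∀ (k : Nat) (hkk : k < n), k < k0 → PySem.Str.isIn kw lines[k] = false := by
    intro k hkk hklt
    have hpref := List.takeWhile_prefix (l := lines) (p := p)
    have hkl : k < (lines.takeWhile p).length := hklt
    have hget : (lines.takeWhile p)[k] = lines[k] := hpref.getElem hkl
    have hmem : (lines.takeWhile p)[k] ∈ lines.takeWhile p := List.getElem_mem hkl
    have hpk := List.mem_takeWhile_imp hmem
    rw [hget] at hpk
    simpa [hp] using hpk
  -- the boundary element (if any) contains kw
  have hbdy : ∀ (h : k0 < n), PySem.Str.isIn kw (lines[k0]'h) = true := by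
    intro h
    have hsome : lines[k0]? = some (lines[k0]'h) := List.getElem?_eq_getElem h
    have hb := pv_takeWhile_boundary p lines
    rw [← hk0] at hb
    have hpb := hb (lines[k0]'h) (by simp [hsome])
    simpa [hp] using hpb
  -- membership in to_remove is exactly k0 ≤ j < n
  have hmem : ∀ j : Int,
      PySem.Set.contains ((PySem.List.enumerate lines 0).foldl (pvAddRemove kw lines.length) PySem.Set.empty) j = true
        ↔ ((k0 : Int) ≤ j ∧ j < (n : Int)) := by
    intro j
    rw [PySem.Set.contains_iff, pv_mem_build]
    constructor
    · rintro (h | ⟨k, hk, hkin, hcond⟩)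
      · simp [PySem.Set.empty] at h
      · have hkge : k0 ≤ k := by
          by_contra hlt
          have hfalse := hpre k (by omega) (by omega)
          rw [hfalse] at hkin; exact absurd hkin (by simp)
        rw [← hn] at hk
        by_cases hlt : (0 : Int) + (k : Int) < (n : Int) - 1
        · rw [if_pos hlt] at hcond; omega
        · rw [if_neg hlt] at hcond; omega
    · rintro ⟨h1, h2⟩
      have hk0lt : k0 < n := by omega
      refine Or.inr ⟨k0, by omega, hbdy hk0lt, ?_⟩
      by_cases hlt : (0 : Int) + (k0 : Int) < (n : Int) - 1
      · rw [if_pos hlt]; omega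
      · rw [if_neg hlt]; omega
  have hA : pvStepA lines kw = (PySem.List.enumerate lines 0).foldl
      (fun acc p => if PySem.Set.contains
          ((PySem.List.enumerate lines 0).foldl (pvAddRemove kw lines.length) PySem.Set.empty) p.1
        then acc else acc ++ [p.2]) [] := rfl
  have hkeep := pv_keep_fold _ k0 n hmem lines 0 (by omega) []
  simp only [Nat.cast_zero, Nat.sub_zero, List.nil_append] at hkeep
  rw [hA, hkeep, pv_trunc_eq_takeWhile, hk0]
  exact (List.prefix_iff_eq_take.mp (List.takeWhile_prefix p)).symm

-- ===== VERDICT (by name: the statement is the Claim_ definition above) =====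
theorem remove_line_and_below_spec : Claim_equal_remove_line_and_below := by
  intro text keywords _
  unfold Spec_remove_line_and_below remove_line_and_below remove_line_and_below_alt
  have hstep : pvStepA = (fun lines keyword => pvTrunc keyword lines) := by
    funext lines kw; exact pv_step_eq lines kw
  rw [hstep]
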